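-- pv_equiv track=rewrite | github.com/katerinka131/build_tree | python.py/pyth.py | find_evolution_path
-- ===== SOURCE A (Python) =====
-- def find_evolution_path(root, leaf):
--     """
--     Правильный алгоритм для ограниченных операций:
--     - Добавление только в конец
--     - Удаление любой подстроки
--     - Замена символов
--     """
--     path = []
--     current = root
--
--     # Основная идея: идем по целевой строке и "подгоняем" текущую под нее
--     i = 0  # индекс в current
--     j = 0  # индекс в leaf
--
--     while j < len(leaf):
--         if i < len(current) and current[i] == leaf[j]:
--             # Символы совпадают - двигаемся дальше
--             i += 1
--             j += 1
--         else:
--             if i < len(current):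
--                 # Текущий символ не совпадает - нужно его обработать
--                 if current[i] in leaf[j:]:
--                     # Символ понадобится позже - удаляем мешающие символы перед ним
--                     # Находим, где этот символ понадобится
--                     found_pos = leaf.find(current[i], j)
--                     if found_pos != -1:
--                         # Удаляем все от текущей позиции до нужного символа
--                         to_delete = current[i:found_pos - j + i]
--                         if to_delete:
--                             path.append(("del", to_delete))
--                             current = current[:i] + current[i + len(to_delete):]
--                         continue
--
--                 # Заменяем текущий символ
--                 path.append(("sub", f"{current[i]}→{leaf[j]}"))
--                 current = current[:i] + leaf[j] + current[i+1:]
--                 i += 1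
--                 j += 1
--             else:
--                 # Достигли конца current - добавляем нужные символы в конец
--                 path.append(("add", leaf[j]))
--                 current += leaf[j]
--                 j += 1
--
--     # Удаляем оставшиеся символы, если они есть
--     if i < len(current):
--         path.append(("del", current[i:]))
--
--     return path
-- ===== SOURCE B (Python) =====
-- def find_evolution_path(root, leaf):
--     occ = {}
--     for idx, ch in enumerate(leaf):
--         occ.setdefault(ch, []).append(idx)
--     ptr = dict.fromkeys(occ, 0)
--     path = []
--     buf = root
--     k = 0; j = 0; n = len(leaf)
--     while j < n:
--         if k < len(buf) and buf[k] == leaf[j]: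
--             k += 1; j += 1
--         elif k < len(buf):
--             c = buf[k]
--             lst = occ.get(c)
--             f = -1
--             if lst is not None:
--                 p = ptr[c]
--                 m = len(lst)
--                 while p < m and lst[p] < j:
--                     p += 1
--                 ptr[c] = p
--                 if p < m: f = lst[p]
--             if f != -1:
--                 d = f - j
--                 path.append(("del", buf[k:k + d]))
--                 k += d
--             else:
--                 path.append(("sub", c + "\u2192" + leaf[j]))
--                 k += 1; j += 1
--         else:
--             path.append(("add", leaf[j]))
--             buf = leaf[j]; k = 0; j += 1
--     if k < len(buf):
--         path.append(("del", buf[k:]))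
--     return path
-- ===== Notes on version B (the rewrite author's own statement) =====
-- stated objective: faster
-- what changed: B precomputes a per-character table of leaf's occurrence positions and walks it with monotone per-character pointers, tracking the current string as an index zipper (buf, k), so each step avoids A's substring scans ('in leaf[j:]'), repeated find() calls and full string rebuilds.
import Mathlib
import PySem

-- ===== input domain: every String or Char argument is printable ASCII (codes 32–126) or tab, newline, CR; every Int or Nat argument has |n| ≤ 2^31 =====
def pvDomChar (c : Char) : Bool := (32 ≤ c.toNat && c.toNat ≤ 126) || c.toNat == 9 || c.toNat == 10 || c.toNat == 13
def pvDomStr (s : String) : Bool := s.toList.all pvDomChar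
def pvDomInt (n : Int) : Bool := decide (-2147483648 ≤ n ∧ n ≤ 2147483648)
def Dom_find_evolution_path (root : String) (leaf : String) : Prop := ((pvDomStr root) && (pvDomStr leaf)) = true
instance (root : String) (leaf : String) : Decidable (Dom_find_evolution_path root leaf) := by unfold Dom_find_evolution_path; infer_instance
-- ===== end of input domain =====

-- B replaces A's per-step substring scans and string rebuilds by a precomputed
-- occurrence table for leaf (with monotone per-character pointers) and an index
-- zipper into the current string; same return value, measured faster.

-- ===== PORT A =====
-- Literal transliteration of A's while-loop as a well-founded recursion on
-- (remaining leaf, remaining current).  'current[i] in leaf[j:]' is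
-- PySem.Chars.isIn on the slice, 'leaf.find(current[i], j)' is PySem.Chars.findFrom.
def Aloop_evo (leaf cur : List Char) (i j : Nat) (path : List (String × String)) :
    List (String × String) :=
  if hj : j < leaf.length then
    if hi : i < cur.length then
      if cur[i]'hi = leaf[j]'hj then
        -- characters match
        Aloop_evo leaf cur (i+1) (j+1) path
      else
        if PySem.Chars.isIn [cur[i]'hi] (PySem.List.slice leaf (some (j:Int)) none) = true then
          -- found_pos = leaf.find(current[i], j)
          let fp := PySem.Chars.findFrom leaf [cur[i]'hi] (j:Int) none
          if fp ≠ -1 then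
            let td := PySem.List.slice cur (some (i:Int)) (some (fp - (j:Int) + (i:Int)))
            if htd : td ≠ [] then
              Aloop_evo leaf
                (PySem.List.slice cur none (some (i:Int)) ++
                  PySem.List.slice cur (some ((i:Int) + td.length)) none)
                i j (path ++ [("del", String.ofList td)])
            else
              -- Python executes `continue` with an unchanged state here: it loops
              -- forever.  The branch is unreachable (found_pos > j, see proofs).
              path
          else
            -- fall through to the substitution (unreachable: membership held)
            Aloop_evo leaf
              (PySem.List.slice cur none (some (i:Int)) ++ [leaf[j]'hj] ++
                PySem.List.slice cur (some ((i:Int) + 1)) none)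
              (i+1) (j+1) (path ++ [("sub", String.ofList [cur[i]'hi, '→', leaf[j]'hj])])
        else
          Aloop_evo leaf
            (PySem.List.slice cur none (some (i:Int)) ++ [leaf[j]'hj] ++
              PySem.List.slice cur (some ((i:Int) + 1)) none)
            (i+1) (j+1) (path ++ [("sub", String.ofList [cur[i]'hi, '→', leaf[j]'hj])])
    else
      Aloop_evo leaf (cur ++ [leaf[j]'hj]) i (j+1) (path ++ [("add", String.ofList [leaf[j]'hj])])
  else
    path ++
      (if i < cur.length then [("del", String.ofList (PySem.List.slice cur (some (i:Int)) none))]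
       else [])
termination_by (leaf.length - j, cur.length - i)
decreasing_by
  · left; omega
  · apply Prod.Lex.right
    have h2 : 0 < td.length := List.length_pos_iff.mpr htd
    have e3 : ((i:Int) + (td.length:Int)) = ((i + td.length : Nat) : Int) := by push_cast; ring
    rw [PySem.List.slice_to_natCast, e3, PySem.List.slice_from_natCast]
    simp only [List.length_append, List.length_take, List.length_drop]
    omega
  · left; omega
  · left; omega
  · left; omega

def find_evolution_path (root : String) (leaf : String) : List (String × String) :=
  Aloop_evo leaf.toList root.toList 0 0 []

-- ===== PORT B =====
-- occ = {}; for idx, ch in enumerate(leaf): occ.setdefault(ch, []).append(idx)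
def buildOcc_evo (l : List Char) : PySem.Dict Char (List Int) :=
  (PySem.List.enumerate l 0).foldl (fun d p => d.modify p.2 [] (· ++ [p.1])) PySem.Dict.empty

-- proof-shape of occ.getD c []: the (Int) positions of c in l, offsets from s
def occList_evo (l : List Char) (c : Char) (s : Int) : List Int :=
  match l with
  | [] => []
  | x :: xs => if x = c then s :: occList_evo xs c (s + 1) else occList_evo xs c (s + 1)

-- the while loop of next_occ: advance p while lst[p] < j
def scanPtr_evo (lst : List Int) (j : Int) (p : Nat) : Nat :=
  if h : p < lst.length then
    if lst[p]'h < j then scanPtr_evo lst j (p+1) else p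
  else p
termination_by lst.length - p

-- ptr = dict.fromkeys(occ, 0)
def initPtr_evo (occ : PySem.Dict Char (List Int)) : PySem.Dict Char Nat :=
  occ.keys.foldl (fun d c => d.insert c 0) PySem.Dict.empty

-- lemmas the port needs for termination (cited in decreasing_by)
lemma foldl_occ_evo (c : Char) (l : List Char) : ∀ (s : Int) (d : PySem.Dict Char (List Int)),
    ((PySem.List.enumerate l s).foldl (fun d p => d.modify p.2 [] (· ++ [p.1])) d).getD c []
      = d.getD c [] ++ occList_evo l c s := by
  induction l with
  | nil => intro s d; simp [PySem.List.enumerate, occList_evo]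
  | cons x xs ih =>
    intro s d
    rw [PySem.List.enumerate_cons, List.foldl_cons, ih]
    rw [PySem.Dict.getD_modify]
    by_cases hx : x = c
    · subst hx
      simp [occList_evo]
    · rw [if_neg (fun h => hx h.symm)]
      simp [occList_evo, hx]

lemma getD_buildOcc_evo (l : List Char) (c : Char) :
    (buildOcc_evo l).getD c [] = occList_evo l c 0 := by
  rw [buildOcc_evo, foldl_occ_evo]
  simp

lemma mem_occList_evo (l : List Char) (c : Char) (s x : Int) :
    x ∈ occList_evo l c s ↔ ∃ k : Nat, k < l.length ∧ x = s + k ∧ l[k]? = some c := by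
  induction l generalizing s with
  | nil => simp [occList_evo]
  | cons y ys ih =>
    rw [occList_evo]
    by_cases hy : y = c
    · rw [if_pos hy, List.mem_cons, ih]
      constructor
      · rintro (rfl | ⟨k, hk, rfl, hget⟩)
        · exact ⟨0, by simp, by simp, by simp [hy]⟩
        · exact ⟨k + 1, by simp; omega, by push_cast; ring, by simpa using hget⟩
      · rintro ⟨k, hk, hx, hget⟩
        cases k with
        | zero =>
          left
          simpa using hx
        | succ k =>
          right
          refine ⟨k, by simp at hk; omega, by push_cast at hx ⊢; omega, by simpa using hget⟩
    · rw [if_neg hy, ih]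
      constructor
      · rintro ⟨k, hk, rfl, hget⟩
        exact ⟨k + 1, by simp; omega, by push_cast; ring, by simpa using hget⟩
      · rintro ⟨k, hk, hx, hget⟩
        cases k with
        | zero =>
          rw [List.getElem?_cons_zero, Option.some.injEq] at hget
          exact absurd hget hy
        | succ k =>
          refine ⟨k, by simp at hk; omega, by push_cast at hx ⊢; omega, by simpa using hget⟩

lemma scanPtr_evo_ge (lst : List Int) (j : Int) (p : Nat)
    (h : scanPtr_evo lst j p < lst.length) : j ≤ lst[scanPtr_evo lst j p]'h := by
  fun_induction scanPtr_evo lst j p with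
  | case1 p h' hlt ih => exact ih h
  | case2 p h' hlt => omega
  | case3 p h' => omega

-- the del step strictly advances k (needed for termination of Bloop_evo)
lemma del_step_pos_evo (leaf : List Char) (c : Char) (j : Nat) (hj : j < leaf.length)
    (lst : List Int) (hoc : (buildOcc_evo leaf).get? c = some lst)
    (p : Nat) (hp : p < lst.length) (hj2 : (j:Int) ≤ lst[p]'hp)
    (hne : c ≠ leaf[j]'hj) : 1 ≤ (lst[p]'hp - (j:Int)).toNat := by
  have hlst : lst = occList_evo leaf c 0 := by
    have := PySem.Dict.getD_eq_get?_getD (d := buildOcc_evo leaf) (k := c) (d0 := ([] : List Int))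
    rw [hoc] at this
    simp only [Option.getD_some] at this
    rw [← this, getD_buildOcc_evo]
  have hmem : lst[p]'hp ∈ occList_evo leaf c 0 := hlst ▸ (List.getElem_mem hp)
  rw [mem_occList_evo] at hmem
  obtain ⟨m, hm, hx, hget⟩ := hmem
  have hne' : lst[p]'hp ≠ (j:Int) := by
    intro hcontr
    have : m = j := by omega
    subst this
    rw [List.getElem?_eq_getElem hm] at hget
    exact hne (by simpa using hget.symm)
  omega

-- the main loop of B: current is buf[k:], never rebuilt (only the add step
-- replaces buf); occ is the constant buildOcc_evo leaf, referenced by name;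
-- ptr holds the monotone per-character pointers; 'f != -1' is 'p < lst.length'.
def Bloop_evo (leaf buf : List Char) (k j : Nat) (ptr : PySem.Dict Char Nat)
    (acc : List (String × String)) : List (String × String) :=
  if hj : j < leaf.length then
    if hk : k < buf.length then
      if buf[k]'hk = leaf[j]'hj then
        Bloop_evo leaf buf (k+1) (j+1) ptr acc
      else
        match hoc : (buildOcc_evo leaf).get? (buf[k]'hk) with
        | none =>
            -- lst is None: f = -1, substitute
            Bloop_evo leaf buf (k+1) (j+1) ptr
              (acc ++ [("sub", String.ofList [buf[k]'hk, '→', leaf[j]'hj])])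
        | some lst =>
            let p := scanPtr_evo lst (j:Int) (ptr.getD (buf[k]'hk) 0)
            let ptr' := ptr.insert (buf[k]'hk) p
            if hp : p < lst.length then
              let d := (lst[p]'hp - (j:Int)).toNat
              Bloop_evo leaf buf (k+d) j ptr'
                (acc ++ [("del", String.ofList ((buf.drop k).take d))])
            else
              Bloop_evo leaf buf (k+1) (j+1) ptr'
                (acc ++ [("sub", String.ofList [buf[k]'hk, '→', leaf[j]'hj])])
    else
      Bloop_evo leaf [leaf[j]'hj] 0 (j+1) ptr (acc ++ [("add", String.ofList [leaf[j]'hj])])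
  else
    acc ++ (if k < buf.length then [("del", String.ofList (buf.drop k))] else [])
termination_by (leaf.length - j, buf.length - k)
decreasing_by
  · left; omega
  · left; omega
  · have h1 := del_step_pos_evo leaf (buf[k]'hk) j hj lst hoc _ hp
      (scanPtr_evo_ge lst (j:Int) _ hp) (by assumption)
    apply Prod.Lex.right
    have h1' : 1 ≤ (lst[scanPtr_evo lst ((j:Int)) (ptr.getD (buf[k]'hk) 0)]'hp - (j:Int)).toNat := h1
    omega
  · left; omega
  · left; omega

def find_evolution_path_alt (root : String) (leaf : String) : List (String × String) :=
  Bloop_evo leaf.toList root.toList 0 0 (initPtr_evo (buildOcc_evo leaf.toList)) []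

-- ===== PRECONDITION & SPEC =====
def Spec_find_evolution_path (root : String) (leaf : String) (out : List (String × String)) : Prop := out = find_evolution_path_alt root leaf
instance (root : String) (leaf : String) (out : List (String × String)) : Decidable (Spec_find_evolution_path root leaf out) := by unfold Spec_find_evolution_path; infer_instance

-- ===== CLAIM (what is proved, stated in full; the proofs are below) =====
def Claim_equal_find_evolution_path : Prop := ∀ (root : String) (leaf : String), Dom_find_evolution_path root leaf → Spec_find_evolution_path root leaf (find_evolution_path root leaf)

-- ===== LEMMAS AND PROOFS =====

lemma scanPtr_evo_skip (lst : List Int) (j : Int) (p : Nat) :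
    ∀ q, p ≤ q → q < scanPtr_evo lst j p → ∀ h : q < lst.length, lst[q]'h < j := by
  fun_induction scanPtr_evo lst j p with
  | case1 p h' hlt ih =>
    intro q hq1 hq2 h
    rcases Nat.eq_or_lt_of_le hq1 with rfl | hq1'
    · exact hlt
    · exact ih q hq1' hq2 h
  | case2 p h' hlt => intro q hq1 hq2 h; omega
  | case3 p h' => intro q hq1 hq2 h; omega


lemma singleton_prefix_iff_evo (c : Char) (s : List Char) : [c] <+: s ↔ s[0]? = some c := by
  constructor
  · rintro ⟨t, rfl⟩; simp
  · intro h
    cases s with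
    | nil => simp at h
    | cons x xs => simp at h; exact ⟨xs, by simp [h]⟩

lemma occList_ge_evo (l : List Char) (c : Char) (s : Int) : ∀ x ∈ occList_evo l c s, s ≤ x := by
  intro x hx
  rw [mem_occList_evo] at hx
  obtain ⟨k, -, rfl, -⟩ := hx
  omega

lemma occList_sorted_evo (l : List Char) (c : Char) (s : Int) :
    (occList_evo l c s).Pairwise (· < ·) := by
  induction l generalizing s with
  | nil => simp [occList_evo]
  | cons x xs ih =>
    rw [occList_evo]
    split
    · exact List.Pairwise.cons (fun y hy => by have := occList_ge_evo xs c (s+1) y hy; omega) (ih (s+1))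
    · exact ih (s+1)

-- the loop invariant on the pointer dictionary: every entry of occ skipped by a
-- pointer names a position < j (j is nondecreasing, so this persists)
def InvP_evo (leaf : List Char) (ptr : PySem.Dict Char Nat) (j : Int) : Prop :=
  ∀ c q (h : q < ((buildOcc_evo leaf).getD c []).length),
    q < ptr.getD c 0 → ((buildOcc_evo leaf).getD c [])[q]'h < j

lemma InvP_evo_mono {leaf ptr j j'} (hj : j ≤ j') (h : InvP_evo leaf ptr j) :
    InvP_evo leaf ptr j' := by
  intro c q hq hlt
  have := h c q hq hlt
  omega

lemma getD_initPtr_evo (occ : PySem.Dict Char (List Int)) (c : Char) :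
    (initPtr_evo occ).getD c 0 = 0 := by
  rw [initPtr_evo]
  generalize occ.keys = ks
  have H : ∀ (ks : List Char) (d : PySem.Dict Char Nat), (∀ c, d.getD c 0 = 0) →
      (ks.foldl (fun d c => d.insert c 0) d).getD c 0 = 0 := by
    intro ks
    induction ks with
    | nil => intro d hd; exact hd c
    | cons x xs ih =>
      intro d hd
      refine ih _ (fun c' => ?_)
      rw [PySem.Dict.getD_insert]
      split <;> simp [hd]
  exact H ks _ (fun c' => by simp)

lemma InvP_evo_init (leaf : List Char) (j : Int) :
    InvP_evo leaf (initPtr_evo (buildOcc_evo leaf)) j := by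
  intro c q hq hlt
  rw [getD_initPtr_evo] at hlt
  omega

lemma InvP_evo_insert {leaf ptr j} (c : Char) (p : Nat)
    (h : InvP_evo leaf ptr j)
    (hc : ∀ q (hq : q < ((buildOcc_evo leaf).getD c []).length), q < p →
      ((buildOcc_evo leaf).getD c [])[q]'hq < j) :
    InvP_evo leaf (ptr.insert c p) j := by
  intro c' q hq hlt
  rw [PySem.Dict.getD_insert] at hlt
  by_cases hcc : c' = c
  · subst hcc; rw [if_pos rfl] at hlt; exact hc q hq hlt
  · rw [if_neg hcc] at hlt; exact h c' q hq hlt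

-- findFrom with a one-character needle is "the least occurrence ≥ j"
lemma findFrom_char_evo (leaf : List Char) (c : Char) (j : Nat) (hj : j ≤ leaf.length)
    (m : Nat) (hm : m < leaf.length) (hmc : leaf[m]'hm = c) (hjm : j ≤ m)
    (hmin : ∀ m', j ≤ m' → ∀ h : m' < leaf.length, leaf[m']'h = c → m ≤ m') :
    PySem.Chars.findFrom leaf [c] (j:Int) none = (m : Int) := by
  have hinf : [c] <:+: leaf.drop j := by
    rw [List.singleton_infix_iff]
    have : leaf[m]'hm ∈ leaf.drop j := by
      rw [List.mem_iff_getElem]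
      exact ⟨m - j, by simp; omega, by rw [List.getElem_drop]; congr 1; omega⟩
    rwa [hmc] at this
  have hne : PySem.Chars.findFrom leaf [c] (j:Int) none ≠ -1 := by
    intro h
    rw [PySem.Chars.findFrom_natCast_eq_neg_one_iff leaf [c] j hj] at h
    exact h hinf
  obtain ⟨h1, h2, h3⟩ := PySem.Chars.findFrom_natCast_spec leaf [c] j hj hne
  set F := PySem.Chars.findFrom leaf [c] (j:Int) none with hF
  rw [singleton_prefix_iff_evo, List.getElem?_drop] at h2
  have hFlen : F.toNat + 0 < leaf.length := by
    by_contra hcon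
    rw [List.getElem?_eq_none (by omega)] at h2
    simp at h2
  rw [List.getElem?_eq_getElem hFlen] at h2
  have h2' : leaf[F.toNat]'(by omega) = c := by simpa using h2
  have hmF : m ≤ F.toNat := hmin F.toNat (by omega) (by omega) h2'
  have hFnn : (0:Int) ≤ F := by omega
  have hFm : F.toNat ≤ m := by
    by_contra hcon
    exact h3 m hjm (by omega) (by
      rw [singleton_prefix_iff_evo, List.getElem?_drop]
      rw [List.getElem?_eq_getElem (by omega : m + 0 < leaf.length)]
      simpa using hmc)
  omega

lemma findFrom_char_none_evo (leaf : List Char) (c : Char) (j : Nat) (hj : j ≤ leaf.length)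
    (hnone : ∀ m, j ≤ m → ∀ h : m < leaf.length, leaf[m]'h ≠ c) :
    PySem.Chars.findFrom leaf [c] (j:Int) none = -1 := by
  rw [PySem.Chars.findFrom_natCast_eq_neg_one_iff leaf [c] j hj]
  rw [List.singleton_infix_iff]
  intro hmem
  rw [List.mem_iff_getElem] at hmem
  obtain ⟨q, hq, hget⟩ := hmem
  rw [List.getElem_drop] at hget
  exact hnone (j + q) (by omega) (by simp at hq; omega) hget

-- the bridge: B's pointer scan computes exactly A's findFrom result
lemma scan_bridge_evo (leaf : List Char) (c : Char) (j : Nat) (hj : j < leaf.length)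
    (ptr : PySem.Dict Char Nat) (hinv : InvP_evo leaf ptr j)
    (lst : List Int) (hoc : (buildOcc_evo leaf).get? c = some lst) :
    (∀ hp : scanPtr_evo lst (j:Int) (ptr.getD c 0) < lst.length,
        PySem.Chars.findFrom leaf [c] (j:Int) none = lst[scanPtr_evo lst (j:Int) (ptr.getD c 0)]'hp
        ∧ (∀ q (hq : q < lst.length), q < scanPtr_evo lst (j:Int) (ptr.getD c 0) → lst[q]'hq < (j:Int)))
    ∧ (lst.length ≤ scanPtr_evo lst (j:Int) (ptr.getD c 0) →
        PySem.Chars.findFrom leaf [c] (j:Int) none = -1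
        ∧ (∀ q (hq : q < lst.length), lst[q]'hq < (j:Int))) := by
  have hlst : lst = occList_evo leaf c 0 := by
    have h := PySem.Dict.getD_eq_get?_getD (d := buildOcc_evo leaf) (k := c) (d0 := ([] : List Int))
    rw [hoc] at h
    simp only [Option.getD_some] at h
    rw [← h, getD_buildOcc_evo]
  have hgd : (buildOcc_evo leaf).getD c [] = lst := by
    rw [getD_buildOcc_evo, ← hlst]
  set p0 := ptr.getD c 0 with hp0
  set p := scanPtr_evo lst (j:Int) p0 with hp
  have hskipall : ∀ q (hq : q < lst.length), q < p → lst[q]'hq < (j:Int) := by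
    intro q hq hqp
    by_cases hq0 : q < p0
    · have hq' : q < ((buildOcc_evo leaf).getD c []).length := by rw [hgd]; exact hq
      have := hinv c q hq' (by rwa [← hp0])
      rwa [List.getElem_of_eq hgd hq'] at this
    · exact scanPtr_evo_skip lst (j:Int) p0 q (by omega) hqp hq
  constructor
  · intro hplen
    refine ⟨?_, hskipall⟩
    have hmem : lst[p]'hplen ∈ occList_evo leaf c 0 := hlst ▸ List.getElem_mem hplen
    rw [mem_occList_evo] at hmem
    obtain ⟨m, hm, hx, hget⟩ := hmem
    have hgetm : leaf[m]'hm = c := by rwa [List.getElem?_eq_getElem hm, Option.some.injEq] at hget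
    have hge : (j:Int) ≤ lst[p]'hplen := scanPtr_evo_ge lst (j:Int) p0 hplen
    have hjm : j ≤ m := by omega
    rw [findFrom_char_evo leaf c j (by omega) m hm hgetm hjm ?_]
    · omega
    · intro m' hjm' hm' hgetm'
      have hmem' : ((m':Int)) ∈ lst := by
        rw [hlst, mem_occList_evo]
        exact ⟨m', hm', by omega, by rw [List.getElem?_eq_getElem hm', hgetm']⟩
      obtain ⟨q, hq, hgq⟩ := List.mem_iff_getElem.mp hmem'
      by_cases hqp : q < p
      · have := hskipall q hq hqp
        omega
      · rcases Nat.eq_or_lt_of_le (Nat.le_of_not_lt hqp) with rfl | hlt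
        · omega
        · have := List.pairwise_iff_getElem.mp (hlst ▸ occList_sorted_evo leaf c 0) p q (by omega) hq hlt
          omega
  · intro hplen
    have hall : ∀ q (hq : q < lst.length), lst[q]'hq < (j:Int) :=
      fun q hq => hskipall q hq (by omega)
    refine ⟨?_, hall⟩
    apply findFrom_char_none_evo leaf c j (by omega)
    intro m hjm hm hgetm
    have hmem' : ((m:Int)) ∈ lst := by
      rw [hlst, mem_occList_evo]
      exact ⟨m, hm, by omega, by rw [List.getElem?_eq_getElem hm, hgetm]⟩
    obtain ⟨q, hq, hgq⟩ := List.mem_iff_getElem.mp hmem'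
    have := hall q hq
    omega

-- when occ has no entry for c, c does not occur in leaf at all
lemma none_bridge_evo (leaf : List Char) (c : Char) (j : Nat) (hj : j ≤ leaf.length)
    (hoc : (buildOcc_evo leaf).get? c = none) :
    PySem.Chars.findFrom leaf [c] (j:Int) none = -1 := by
  have hgd : (buildOcc_evo leaf).getD c [] = [] := by
    rw [PySem.Dict.getD_eq_get?_getD, hoc]
    rfl
  rw [getD_buildOcc_evo] at hgd
  apply findFrom_char_none_evo leaf c j hj
  intro m hjm hm hgetm
  have : ((m:Int)) ∈ occList_evo leaf c 0 := by
    rw [mem_occList_evo]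
    exact ⟨m, hm, by omega, by rw [List.getElem?_eq_getElem hm, hgetm]⟩
  rw [hgd] at this
  simp at this

lemma isIn_bridge_evo (leaf : List Char) (c : Char) (j : Nat) (hj : j ≤ leaf.length) :
    (PySem.Chars.isIn [c] (PySem.List.slice leaf (some (j:Int)) none) = true)
      ↔ PySem.Chars.findFrom leaf [c] (j:Int) none ≠ -1 := by
  rw [PySem.List.slice_from_natCast, PySem.Chars.isIn_iff_infix]
  rw [ne_eq, PySem.Chars.findFrom_natCast_eq_neg_one_iff leaf [c] j hj]
  tauto

lemma drop_append_len_evo {α : Type} (l₁ l₂ : List α) (i : Nat) (h : l₁.length = i) :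
    List.drop i (l₁ ++ l₂) = l₂ := by
  subst h
  exact List.drop_left

lemma drop_lt_iff_evo {cur buf : List Char} {i k : Nat} (hik : cur.drop i = buf.drop k) :
    i < cur.length ↔ k < buf.length := by
  constructor <;> intro h
  · have h1 : buf.drop k ≠ [] := by
      rw [← hik]; simp only [ne_eq, List.drop_eq_nil_iff]; omega
    simp only [ne_eq, List.drop_eq_nil_iff] at h1; omega
  · have h1 : cur.drop i ≠ [] := by
      rw [hik]; simp only [ne_eq, List.drop_eq_nil_iff]; omega
    simp only [ne_eq, List.drop_eq_nil_iff] at h1; omega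

lemma head_eq_evo {cur buf : List Char} {i k : Nat} (hik : cur.drop i = buf.drop k)
    (hi : i < cur.length) (hk : k < buf.length) : cur[i]'hi = buf[k]'hk := by
  have : cur[i]? = buf[k]? := by
    rw [← List.head?_drop, ← List.head?_drop, hik]
  rw [List.getElem?_eq_getElem hi, List.getElem?_eq_getElem hk] at this
  simpa using this


-- one-step unfolding lemmas for Bloop_evo
lemma Bloop_match_evo {leaf buf : List Char} {k j : Nat} {ptr} {acc : List (String × String)}
    (hj : j < leaf.length) (hk : k < buf.length) (heq : buf[k]'hk = leaf[j]'hj) :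
    Bloop_evo leaf buf k j ptr acc = Bloop_evo leaf buf (k+1) (j+1) ptr acc := by
  rw [Bloop_evo]
  simp only [dif_pos hj, dif_pos hk, if_pos heq]

lemma Bloop_subNone_evo {leaf buf : List Char} {k j : Nat} {ptr} {acc : List (String × String)}
    (hj : j < leaf.length) (hk : k < buf.length) (hne : ¬ buf[k]'hk = leaf[j]'hj)
    (hoc : (buildOcc_evo leaf).get? (buf[k]'hk) = none) :
    Bloop_evo leaf buf k j ptr acc =
      Bloop_evo leaf buf (k+1) (j+1) ptr
        (acc ++ [("sub", String.ofList [buf[k]'hk, '→', leaf[j]'hj])]) := by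
  rw [Bloop_evo]
  simp only [dif_pos hj, dif_pos hk, if_neg hne]
  split
  · rfl
  · next lst heq => rw [hoc] at heq; cases heq

lemma Bloop_subSome_evo {leaf buf : List Char} {k j : Nat} {ptr} {acc : List (String × String)}
    (hj : j < leaf.length) (hk : k < buf.length) (hne : ¬ buf[k]'hk = leaf[j]'hj)
    {lst : List Int} (hoc : (buildOcc_evo leaf).get? (buf[k]'hk) = some lst)
    (hp : ¬ scanPtr_evo lst (j:Int) (ptr.getD (buf[k]'hk) 0) < lst.length) :
    Bloop_evo leaf buf k j ptr acc =
      Bloop_evo leaf buf (k+1) (j+1)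
        (ptr.insert (buf[k]'hk) (scanPtr_evo lst (j:Int) (ptr.getD (buf[k]'hk) 0)))
        (acc ++ [("sub", String.ofList [buf[k]'hk, '→', leaf[j]'hj])]) := by
  rw [Bloop_evo]
  simp only [dif_pos hj, dif_pos hk, if_neg hne]
  split
  · next heq => rw [hoc] at heq; cases heq
  · next lst' heq =>
    rw [hoc] at heq
    cases heq
    rw [dif_neg hp]

lemma Bloop_del_evo {leaf buf : List Char} {k j : Nat} {ptr} {acc : List (String × String)}
    (hj : j < leaf.length) (hk : k < buf.length) (hne : ¬ buf[k]'hk = leaf[j]'hj)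
    {lst : List Int} (hoc : (buildOcc_evo leaf).get? (buf[k]'hk) = some lst)
    (hp : scanPtr_evo lst (j:Int) (ptr.getD (buf[k]'hk) 0) < lst.length)
    (d : Nat) (hd : d = (lst[scanPtr_evo lst (j:Int) (ptr.getD (buf[k]'hk) 0)]'hp - (j:Int)).toNat) :
    Bloop_evo leaf buf k j ptr acc =
      Bloop_evo leaf buf (k + d) j
        (ptr.insert (buf[k]'hk) (scanPtr_evo lst (j:Int) (ptr.getD (buf[k]'hk) 0)))
        (acc ++ [("del", String.ofList ((buf.drop k).take d))]) := by
  subst hd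
  rw [Bloop_evo]
  simp only [dif_pos hj, dif_pos hk, if_neg hne]
  split
  · next heq => rw [hoc] at heq; cases heq
  · next lst' heq =>
    rw [hoc] at heq
    cases heq
    rw [dif_pos hp]

lemma Bloop_add_evo {leaf buf : List Char} {k j : Nat} {ptr} {acc : List (String × String)}
    (hj : j < leaf.length) (hk : ¬ k < buf.length) :
    Bloop_evo leaf buf k j ptr acc =
      Bloop_evo leaf [leaf[j]'hj] 0 (j+1) ptr (acc ++ [("add", String.ofList [leaf[j]'hj])]) := by
  rw [Bloop_evo]
  simp only [dif_pos hj, dif_neg hk]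

lemma Bloop_base_evo {leaf buf : List Char} {k j : Nat} {ptr} {acc : List (String × String)}
    (hj : ¬ j < leaf.length) :
    Bloop_evo leaf buf k j ptr acc =
      acc ++ (if k < buf.length then [("del", String.ofList (buf.drop k))] else []) := by
  rw [Bloop_evo]
  simp only [dif_neg hj]

lemma main_loop_eq_evo (leaf : List Char) (cur : List Char) (i j : Nat)
    (path : List (String × String)) :
    ∀ (buf : List Char) (k : Nat) (ptr : PySem.Dict Char Nat),
      cur.drop i = buf.drop k → i ≤ cur.length → InvP_evo leaf ptr (j:Int) →
      Aloop_evo leaf cur i j path = Bloop_evo leaf buf k j ptr path := by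
  fun_induction Aloop_evo leaf cur i j path with
  | case1 cur i j path hj hi heq ih =>
    intro buf k ptr hik hile hinv
    have hk : k < buf.length := (drop_lt_iff_evo hik).mp hi
    have hh := head_eq_evo hik hi hk
    rw [Bloop_match_evo hj hk (by rw [← hh, heq])]
    apply ih
    · have h1 : List.drop 1 (List.drop i cur) = List.drop 1 (List.drop k buf) := by rw [hik]
      rwa [List.drop_drop, List.drop_drop] at h1
    · omega
    · exact InvP_evo_mono (by push_cast; omega) hinv
  | case2 cur i j path hj hi hne hin fp hfp td htd ih =>
    intro buf k ptr hik hile hinv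
    have hk : k < buf.length := (drop_lt_iff_evo hik).mp hi
    have hh := head_eq_evo hik hi hk
    have hne' : ¬ buf[k]'hk = leaf[j]'hj := by rw [← hh]; exact hne
    have hlen0 : cur.length - i = buf.length - k := by
      have := congrArg List.length hik
      simp only [List.length_drop] at this
      omega
    cases hoc : (buildOcc_evo leaf).get? (buf[k]'hk) with
    | none =>
      refine absurd ?_ hfp
      show PySem.Chars.findFrom leaf [cur[i]'hi] ((j:Nat):Int) = -1
      rw [hh]
      exact none_bridge_evo leaf (buf[k]'hk) j (by omega) hoc
    | some lst =>
      have hbr := scan_bridge_evo leaf (buf[k]'hk) j hj ptr hinv lst hoc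
      set p := scanPtr_evo lst (j:Int) (ptr.getD (buf[k]'hk) 0) with hpdef
      by_cases hp : p < lst.length
      · obtain ⟨hfind, hskip⟩ := hbr.1 hp
        obtain ⟨F, hFeq⟩ : ∃ F : Int, lst[p]'hp = F := ⟨_, rfl⟩
        rw [hFeq] at hfind
        have hge : (j:Int) ≤ F := hFeq ▸ scanPtr_evo_ge lst (j:Int) _ hp
        have hfpval : fp = F := by
          show PySem.Chars.findFrom leaf [cur[i]'hi] ((j:Nat):Int) = F
          rw [hh]
          exact hfind
        have hd1' : 1 ≤ ((lst[p]'hp) - (j:Int)).toNat :=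
          del_step_pos_evo leaf (buf[k]'hk) j hj lst hoc p hp (hFeq ▸ hge) hne'
        set dB := (F - (j:Int)).toNat with hdB
        have hd1 : 1 ≤ dB := by rw [hdB, ← hFeq]; exact hd1'
        have hdB' : dB = ((lst[p]'hp) - (j:Int)).toNat := by rw [hdB, hFeq]
        have htdval : td = (buf.drop k).take dB := by
          show PySem.List.slice cur (some ((i:Nat):Int)) (some (fp - (j:Nat) + (i:Nat))) = _
          rw [hfpval, PySem.List.slice_toNat cur (by omega) (by omega)]
          simp only [Int.toNat_natCast]
          rw [hik]
          congr 1
          omega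
        have htdlen : td.length = min dB (buf.length - k) := by rw [htdval]; simp
        rw [Bloop_del_evo hj hk hne' hoc hp dB hdB', ← htdval]
        apply ih
        · rw [PySem.List.slice_to_natCast]
          have e3 : (((i:Nat):Int) + (td.length : Int)) = (((i + td.length : Nat)) : Int) := by
            push_cast; ring
          rw [e3, PySem.List.slice_from_natCast]
          rw [drop_append_len_evo _ _ i (by simp; omega)]
          by_cases hcase : dB ≤ buf.length - k
          · have htl : td.length = dB := by omega
            rw [htl]
            have h1 : List.drop dB (List.drop i cur) = List.drop dB (List.drop k buf) := by
              rw [hik]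
            rwa [List.drop_drop, List.drop_drop] at h1
          · rw [List.drop_eq_nil_of_le (by omega), List.drop_eq_nil_of_le (by omega)]
        · rw [PySem.List.slice_to_natCast,
            show (((i:Nat):Int) + (td.length : Int)) = (((i + td.length : Nat)) : Int) from by
              push_cast; ring,
            PySem.List.slice_from_natCast]
          simp only [List.length_append, List.length_take, List.length_drop]
          omega
        · apply InvP_evo_insert _ _ hinv
          intro q hq hqp
          have hgd : (buildOcc_evo leaf).getD (buf[k]'hk) [] = lst := by
            rw [PySem.Dict.getD_eq_get?_getD, hoc]; rfl
          rw [List.getElem_of_eq hgd hq]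
          exact hskip q _ hqp
      · obtain ⟨hfind, -⟩ := hbr.2 (by omega)
        refine absurd ?_ hfp
        show PySem.Chars.findFrom leaf [cur[i]'hi] ((j:Nat):Int) = -1
        rw [hh]
        exact hfind
  | case3 cur i j path hj hi hne hin fp hfp td htd =>
    intro buf k ptr hik hile hinv
    exfalso
    have hk : k < buf.length := (drop_lt_iff_evo hik).mp hi
    have hh := head_eq_evo hik hi hk
    have hne' : ¬ buf[k]'hk = leaf[j]'hj := by rw [← hh]; exact hne
    cases hoc : (buildOcc_evo leaf).get? (buf[k]'hk) with
    | none =>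
      refine absurd ?_ hfp
      show PySem.Chars.findFrom leaf [cur[i]'hi] ((j:Nat):Int) = -1
      rw [hh]
      exact none_bridge_evo leaf (buf[k]'hk) j (by omega) hoc
    | some lst =>
      have hbr := scan_bridge_evo leaf (buf[k]'hk) j hj ptr hinv lst hoc
      set p := scanPtr_evo lst (j:Int) (ptr.getD (buf[k]'hk) 0) with hpdef
      by_cases hp : p < lst.length
      · obtain ⟨hfind, -⟩ := hbr.1 hp
        obtain ⟨F, hFeq⟩ : ∃ F : Int, lst[p]'hp = F := ⟨_, rfl⟩
        rw [hFeq] at hfind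
        have hge : (j:Int) ≤ F := hFeq ▸ scanPtr_evo_ge lst (j:Int) _ hp
        have hfpval : fp = F := by
          show PySem.Chars.findFrom leaf [cur[i]'hi] ((j:Nat):Int) = F
          rw [hh]
          exact hfind
        have hd1' : 1 ≤ ((lst[p]'hp) - (j:Int)).toNat :=
          del_step_pos_evo leaf (buf[k]'hk) j hj lst hoc p hp (hFeq ▸ hge) hne'
        have hd1 : 1 ≤ (F - (j:Int)).toNat := by rw [← hFeq]; exact hd1'
        apply htd
        show PySem.List.slice cur (some ((i:Nat):Int)) (some (fp - (j:Nat) + (i:Nat))) ≠ []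
        rw [hfpval, PySem.List.slice_toNat cur (by omega) (by omega)]
        simp only [Int.toNat_natCast]
        intro hcontr
        rw [List.take_eq_nil_iff] at hcontr
        rcases hcontr with hcontr | hcontr
        · omega
        · rw [List.drop_eq_nil_iff] at hcontr
          omega
      · obtain ⟨hfind, -⟩ := hbr.2 (by omega)
        refine absurd ?_ hfp
        show PySem.Chars.findFrom leaf [cur[i]'hi] ((j:Nat):Int) = -1
        rw [hh]
        exact hfind
  | case4 cur i j path hj hi hne hin fp hfp ih =>
    intro buf k ptr hik hile hinv
    exact absurd ((isIn_bridge_evo leaf (cur[i]'hi) j (by omega)).mp hin) hfp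
  | case5 cur i j path hj hi hne hnin ih =>
    intro buf k ptr hik hile hinv
    have hk : k < buf.length := (drop_lt_iff_evo hik).mp hi
    have hh := head_eq_evo hik hi hk
    have hne' : ¬ buf[k]'hk = leaf[j]'hj := by rw [← hh]; exact hne
    have hfp : PySem.Chars.findFrom leaf [buf[k]'hk] ((j:Nat):Int) = -1 := by
      rw [← hh]
      by_contra hcon
      exact hnin ((isIn_bridge_evo leaf (cur[i]'hi) j (by omega)).mpr hcon)
    have hrec : ∀ ptr', InvP_evo leaf ptr' (((j+1:Nat)):Int) →
        Aloop_evo leaf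
          (PySem.List.slice cur none (some ((i:Nat):Int)) ++ [leaf[j]'hj] ++
            PySem.List.slice cur (some (((i:Nat):Int) + 1)) none)
          (i+1) (j+1) (path ++ [("sub", String.ofList [cur[i]'hi, '→', leaf[j]'hj])]) =
        Bloop_evo leaf buf (k+1) (j+1) ptr'
          (path ++ [("sub", String.ofList [cur[i]'hi, '→', leaf[j]'hj])]) := by
      intro ptr' hinv'
      apply ih
      · rw [PySem.List.slice_to_natCast]
        have e3 : (((i:Nat):Int) + 1) = (((i + 1 : Nat)) : Int) := by push_cast; ring
        rw [e3, PySem.List.slice_from_natCast]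
        rw [drop_append_len_evo (List.take i cur ++ [leaf[j]'hj]) _ (i+1) (by simp; omega)]
        have h1 : List.drop 1 (List.drop i cur) = List.drop 1 (List.drop k buf) := by rw [hik]
        rwa [List.drop_drop, List.drop_drop] at h1
      · rw [PySem.List.slice_to_natCast,
          show (((i:Nat):Int) + 1) = (((i + 1 : Nat)) : Int) from by push_cast; ring,
          PySem.List.slice_from_natCast]
        simp only [List.length_append, List.length_take, List.length_cons,
          List.length_drop, List.length_nil]
        omega
      · exact hinv'
    cases hoc : (buildOcc_evo leaf).get? (buf[k]'hk) with
    | none =>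
      rw [Bloop_subNone_evo hj hk hne' hoc, ← hh]
      exact hrec ptr (InvP_evo_mono (by push_cast; omega) hinv)
    | some lst =>
      have hbr := scan_bridge_evo leaf (buf[k]'hk) j hj ptr hinv lst hoc
      by_cases hp : scanPtr_evo lst (j:Int) (ptr.getD (buf[k]'hk) 0) < lst.length
      · obtain ⟨hfind, -⟩ := hbr.1 hp
        have := scanPtr_evo_ge lst (j:Int) (ptr.getD (buf[k]'hk) 0) hp
        rw [hfind] at hfp
        omega
      · obtain ⟨-, hall⟩ := hbr.2 (by omega)
        have hinv' : InvP_evo leaf (ptr.insert (buf[k]'hk)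
            (scanPtr_evo lst (j:Int) (ptr.getD (buf[k]'hk) 0))) (j:Int) := by
          apply InvP_evo_insert _ _ hinv
          intro q hq hqp
          have hgd : (buildOcc_evo leaf).getD (buf[k]'hk) [] = lst := by
            rw [PySem.Dict.getD_eq_get?_getD, hoc]; rfl
          rw [List.getElem_of_eq hgd hq]
          exact hall q _
        rw [Bloop_subSome_evo hj hk hne' hoc hp, ← hh]
        rw [← hh] at hinv'
        exact hrec _ (InvP_evo_mono (by push_cast; omega) hinv')
  | case6 cur i j path hj hi ih =>
    intro buf k ptr hik hile hinv
    have hk : ¬ k < buf.length := fun hcon => hi ((drop_lt_iff_evo hik).mpr hcon)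
    rw [Bloop_add_evo hj hk]
    apply ih
    · have hieq : i = cur.length := by omega
      subst hieq
      simp
    · simp
      omega
    · exact InvP_evo_mono (by push_cast; omega) hinv
  | case7 cur i j path hj =>
    intro buf k ptr hik hile hinv
    rw [Bloop_base_evo hj]
    have hiff := drop_lt_iff_evo hik
    congr 1
    by_cases hi : i < cur.length
    · rw [if_pos hi, if_pos (hiff.mp hi), PySem.List.slice_from_natCast, hik]
    · rw [if_neg hi, if_neg (fun hcon => hi (hiff.mpr hcon))]

-- ===== VERDICT (by name: the statement is the Claim_ definition above) =====
theorem find_evolution_path_spec : Claim_equal_find_evolution_path := by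
  intro root leaf _
  unfold Spec_find_evolution_path find_evolution_path find_evolution_path_alt
  exact main_loop_eq_evo leaf.toList root.toList 0 0 [] root.toList 0 _ rfl (by omega)
    (InvP_evo_init leaf.toList _)
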